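-- pv_equiv track=rewrite | github.com/vertig0d/PythonWorkout | ch3_ListsAndTuples/ex12_WordsWithMostRepeatedWords.py | get_counter_val
-- ===== SOURCE A (Python) =====
-- from collections import Counter
--
-- def get_counter_val(words):
--     wrd = ''
--     max_wrd_cnt = 0
--     for item in words:
--         dic_item = dict(Counter(item))
--         max_letter = dic_item[max(dic_item, key= lambda x:dic_item[x])]
--         if max_letter > max_wrd_cnt:
--             wrd = item
--             max_wrd_cnt = max_letter
--     return wrd
-- ===== SOURCE B (Python) =====
-- def get_counter_val(words):
--     def peak(w):
--         best = 0
--         run = 0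
--         prev = None
--         for c in sorted(w):
--             run = run + 1 if c == prev else 1
--             if run > best:
--                 best = run
--             prev = c
--         return best
--     return max(words, key=peak, default='')
-- ===== Notes on version B (the rewrite author's own statement) =====
-- stated objective: faster
-- what changed: B computes each word's peak by sorting its characters and scanning for the longest run of equal adjacent characters (sort-and-longest-run) instead of A's hash counting (Counter + argmax over the dict with a Python lambda), and picks the word with max(words, key=peak, default='') instead of A's explicit best-tracking accumulator loop.
-- crash fix: On any list containing an empty string A raises ValueError (max() over Counter('')'s empty key set); B treats the empty word's peak as 0 and returns the usual first maximum, e.g. '' on ['']. — e.g. on get_counter_val([""]): A raises ValueError, B returns ""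
import Mathlib
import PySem

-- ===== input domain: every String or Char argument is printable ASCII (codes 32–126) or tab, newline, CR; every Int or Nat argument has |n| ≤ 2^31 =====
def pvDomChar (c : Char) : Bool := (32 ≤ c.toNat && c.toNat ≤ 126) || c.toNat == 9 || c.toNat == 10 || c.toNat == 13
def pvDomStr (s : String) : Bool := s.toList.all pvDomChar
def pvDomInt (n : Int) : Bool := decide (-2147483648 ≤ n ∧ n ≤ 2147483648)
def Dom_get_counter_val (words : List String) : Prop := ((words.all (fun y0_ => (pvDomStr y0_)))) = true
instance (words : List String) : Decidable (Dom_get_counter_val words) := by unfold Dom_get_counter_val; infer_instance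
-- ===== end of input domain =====

-- B replaces A's hash-counting (Counter + argmax over the dict) by a sort-and-longest-run scan per word
-- (sorted chars, track the longest run of equal adjacent chars) under an idiomatic max(words, key=peak, default='');
-- return-value equivalence, no argument is mutated.

-- ===== PORT A =====
def get_counter_val (words : List String) : String :=
  (words.foldl (fun (st : String × Int) item =>
      let dic : PySem.Dict Char Int := PySem.Dict.counter item.toList
      -- max(dic_item, key=lambda x: dic_item[x]); Python raises ValueError on an empty dict
      match PySem.List.max? dic.keys (fun y => dic.getD y 0) with
      | none => st      -- unreachable under Pre_ (the word is empty; Python raises here)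
      | some k =>
        let max_letter := dic.getD k 0   -- dic_item[k]; k is a key of dic, so getD is exact
        if st.2 < max_letter then (item, max_letter) else st)
    ("", 0)).1

-- ===== PORT B =====
-- loop body: run = run + 1 if c == prev else 1; if run > best: best = run; prev = c
-- state (best, run, prev)
def pvRunStep (st : Int × Int × Option Char) (c : Char) : Int × Int × Option Char :=
  let run := if some c = st.2.2 then st.2.1 + 1 else 1
  let best := if st.1 < run then run else st.1
  (best, run, some c)

-- peak(w): longest run of equal adjacent characters in sorted(w)
def pvPeak (w : String) : Int :=
  ((PySem.List.sorted w.toList (fun c => c) false).foldl pvRunStep (0, 0, none)).1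

-- max(words, key=peak, default='')
def get_counter_val_alt (words : List String) : String :=
  PySem.List.maxD words pvPeak ""

-- ===== PRECONDITION & SPEC =====
-- Pre_ excludes lists containing the empty string, on which A raises ValueError (max() over an empty dict).
def Pre_get_counter_val (words : List String) : Prop := ∀ w ∈ words, w ≠ ""
instance (words : List String) : Decidable (Pre_get_counter_val words) := by unfold Pre_get_counter_val; infer_instance

def pvWitness_get_counter_val : List String := ["hello", "ab"]

-- On any list containing an empty string A raises ValueError; B treats the empty word's peak as 0 and returns the usual maximum.
def Raises_get_counter_val (words : List String) : Prop := "" ∈ words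
instance (words : List String) : Decidable (Raises_get_counter_val words) := by unfold Raises_get_counter_val; infer_instance
def pvRaiseWitness_get_counter_val : List String := [""]
def pvRaiseWitnessOut_get_counter_val : String := ""

def Spec_get_counter_val (words : List String) (out : String) : Prop := out = get_counter_val_alt words
instance (words : List String) (out : String) : Decidable (Spec_get_counter_val words out) := by unfold Spec_get_counter_val; infer_instance

-- ===== CLAIM (what is proved, stated in full; the proofs are below) =====
def Claim_equal_get_counter_val : Prop := ∀ (words : List String), Dom_get_counter_val words → Pre_get_counter_val words → Spec_get_counter_val words (get_counter_val words)

def Claim_raises_get_counter_val : Prop := (∀ (words : List String), Dom_get_counter_val words → Raises_get_counter_val words → ¬ Pre_get_counter_val words) ∧ (Dom_get_counter_val (pvRaiseWitness_get_counter_val) ∧ Raises_get_counter_val (pvRaiseWitness_get_counter_val) ∧ get_counter_val_alt (pvRaiseWitness_get_counter_val) = pvRaiseWitnessOut_get_counter_val)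

-- ===== LEMMAS AND PROOFS =====

-- proof-side mirror of the run scan: M c run t = final `best` contribution of scanning t with current run `run` on char c
def pvM (c : Char) (run : Int) : List Char → Int
  | [] => run
  | d :: t => if d = c then pvM c (run + 1) t else max run (pvM d 1 t)

lemma pvM_ge (t : List Char) : ∀ c run, run ≤ pvM c run t := by
  induction t with
  | nil => intro c run; simp [pvM]
  | cons d t ih =>
    intro c run
    by_cases h : d = c
    · simpa [pvM, h] using le_trans (by omega) (ih c (run + 1))
    · simp [pvM, h]

-- the fold over the tail computes max best (pvM prev run tail), given run ≤ best
lemma foldl_runStep (t : List Char) : ∀ (best run : Int) (c : Char), run ≤ best →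
    (t.foldl pvRunStep (best, run, some c)).1 = max best (pvM c run t) := by
  induction t with
  | nil => intro best run c h; simp [pvM]; omega
  | cons d t ih =>
    intro best run c h
    by_cases hd : d = c
    · have h1 : pvRunStep (best, run, some c) d = (max best (run + 1), run + 1, some d) := by
        simp [pvRunStep, hd, max_def]; omega
      rw [List.foldl_cons, h1, ih _ _ _ (le_max_right _ _)]
      have := pvM_ge t c (run + 1)
      simp [pvM, hd]
      omega
    · have h1 : pvRunStep (best, run, some c) d = (max best 1, 1, some d) := by
        simp [pvRunStep, hd, max_def]; omega
      rw [List.foldl_cons, h1, ih _ _ _ (le_max_right _ _)]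
      have := pvM_ge t d 1
      simp [pvM, hd]
      omega

-- ((e :: t).count d : Int) split off the head occurrence
lemma pvCountConsInt (d e : Char) (t : List Char) :
    ((e :: t).count d : Int) = (t.count d : Int) + (if d = e then 1 else 0) := by
  by_cases h : d = e
  · simp [h]
  · simp [List.count_cons, h]
    exact fun g => h g.symm

-- on a sorted tail, pvM is the achieved maximum of the character counts
lemma pvM_counts (t : List Char) : ∀ (c : Char) (run : Int), (c :: t).Pairwise (· ≤ ·) → 1 ≤ run →
    (∀ d ∈ (c :: t), (t.count d : Int) + (if d = c then run else 0) ≤ pvM c run t) ∧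
    (∃ d ∈ (c :: t), pvM c run t = (t.count d : Int) + (if d = c then run else 0)) := by
  induction t with
  | nil =>
    intro c run _ hr
    constructor
    · intro d hd; simp at hd; subst hd; simp [pvM]
    · exact ⟨c, by simp, by simp [pvM]⟩
  | cons e t ih =>
    intro c run hp hr
    have hce : c ≤ e := (List.pairwise_cons.1 hp).1 e (by simp)
    have hpe : (e :: t).Pairwise (· ≤ ·) := (List.pairwise_cons.1 hp).2
    by_cases hec : e = c
    · subst hec
      obtain ⟨hub, d₀, hd₀, hval⟩ := ih e (run + 1) hpe (by omega)
      have hM : pvM e run (e :: t) = pvM e (run + 1) t := by simp [pvM]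
      constructor
      · intro d hd
        have hd' : d ∈ e :: t := by
          rcases List.mem_cons.1 hd with h | h
          · subst h; simp
          · exact h
        have h2 := hub d hd'
        rw [hM, pvCountConsInt]
        by_cases hde : d = e
        · simp only [if_pos hde] at h2 ⊢; omega
        · simp only [if_neg hde] at h2 ⊢; omega
      · refine ⟨d₀, List.mem_cons_of_mem _ hd₀, ?_⟩
        rw [hM, hval, pvCountConsInt]
        by_cases hde : d₀ = e
        · simp only [if_pos hde]; omega
        · simp only [if_neg hde]; omega
    · have hlt : c < e := lt_of_le_of_ne hce (fun h => hec h.symm)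
      have hcnot : c ∉ e :: t := by
        intro hmem
        rcases List.mem_cons.1 hmem with h | h
        · exact hec h.symm
        · have h2 := (List.pairwise_cons.1 hpe).1 c h
          exact absurd hlt (not_lt.2 h2)
      obtain ⟨hub, d₀, hd₀, hval⟩ := ih e 1 hpe le_rfl
      have hM : pvM c run (e :: t) = max run (pvM e 1 t) := by simp [pvM, hec]
      have hml := le_max_left run (pvM e 1 t)
      have hmr := le_max_right run (pvM e 1 t)
      constructor
      · intro d hd
        rw [hM]
        rcases List.mem_cons.1 hd with h | h
        · rw [h, List.count_eq_zero.2 hcnot, if_pos rfl]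
          omega
        · have hdc : d ≠ c := fun heq => hcnot (heq ▸ h)
          have h2 := hub d h
          rw [pvCountConsInt]
          simp only [if_neg hdc]
          by_cases hde : d = e
          · simp only [if_pos hde] at h2 ⊢; omega
          · simp only [if_neg hde] at h2 ⊢; omega
      · by_cases hcase : run ≤ pvM e 1 t
        · refine ⟨d₀, List.mem_cons_of_mem _ hd₀, ?_⟩
          have hdc : d₀ ≠ c := fun heq => hcnot (heq ▸ hd₀)
          rw [hM, max_eq_right hcase, hval, pvCountConsInt]
          simp only [if_neg hdc]
          by_cases hde : d₀ = e
          · simp only [if_pos hde]; omega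
          · simp only [if_neg hde]; omega
        · refine ⟨c, by simp, ?_⟩
          rw [hM, List.count_eq_zero.2 hcnot, if_pos rfl, max_eq_left (by omega)]
          omega

-- pvPeak is an achieved upper bound of the character counts of w.toList (for a nonempty word)
lemma pvPeak_char (w : String) (hw : w.toList ≠ []) :
    (∀ y ∈ w.toList, (w.toList.count y : Int) ≤ pvPeak w) ∧
    (∃ d ∈ w.toList, pvPeak w = (w.toList.count d : Int)) := by
  set s := PySem.List.sorted w.toList (fun c => c) false with hs
  have hperm : s.Perm w.toList := PySem.List.sorted_perm _ _ _
  have hpair : s.Pairwise (· ≤ ·) := by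
    have := PySem.List.sorted_pairwise w.toList (fun c => c)
    simpa using this
  have hsne : s ≠ [] := by
    intro h
    rw [h] at hperm
    exact hw (List.Perm.nil_eq hperm).symm
  obtain ⟨c, t, hct⟩ := List.exists_cons_of_ne_nil hsne
  have hpeak : pvPeak w = max 1 (pvM c 1 t) := by
    have hstep : pvRunStep (0, 0, none) c = (1, 1, some c) := by
      simp [pvRunStep]
    rw [pvPeak, ← hs, hct, List.foldl_cons, hstep, foldl_runStep t 1 1 c le_rfl]
  obtain ⟨hub, d₀, hd₀, hval⟩ := pvM_counts t c 1 (hct ▸ hpair) le_rfl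
  have hcount : ∀ y : Char, s.count y = w.toList.count y := fun y => hperm.count_eq y
  have hmem : ∀ y : Char, (y ∈ s ↔ y ∈ w.toList) := fun y => hperm.mem_iff
  have h1 : (1 : Int) ≤ pvM c 1 t := pvM_ge t c 1
  have hmr := le_max_right (1 : Int) (pvM c 1 t)
  constructor
  · intro y hy
    have hys : y ∈ s := (hmem y).2 hy
    rw [hct] at hys
    have h2 := hub y hys
    have hcy : (w.toList.count y : Int) = ((c :: t).count y : Int) := by rw [← hcount y, hct]
    rw [hpeak, hcy, pvCountConsInt]
    by_cases hyc : y = c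
    · simp only [if_pos hyc] at h2 ⊢; omega
    · simp only [if_neg hyc] at h2 ⊢; omega
  · refine ⟨d₀, (hmem d₀).1 (hct ▸ hd₀), ?_⟩
    have hcd : (w.toList.count d₀ : Int) = ((c :: t).count d₀ : Int) := by rw [← hcount d₀, hct]
    rw [hpeak, max_eq_right h1, hval, hcd, pvCountConsInt]

lemma toList_ne_nil (w : String) (h : w ≠ "") : w.toList ≠ [] := by
  intro hn
  exact h (String.toList_eq_nil_iff.mp hn)

-- A's per-word value (the count of the argmax key of Counter(item)) equals B's sort-and-run peak.
lemma peakA_eq (w : String) (k : Char)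
    (hk : PySem.List.max? (PySem.Dict.counter w.toList).keys
            (fun x => (PySem.Dict.counter w.toList).getD x 0) = some k) :
    (PySem.Dict.counter w.toList).getD k 0 = pvPeak w := by
  have hkmem : k ∈ (PySem.Dict.counter w.toList).keys := PySem.List.max?_mem hk
  have hkl : k ∈ w.toList := by
    rw [PySem.Dict.keys_counter] at hkmem
    exact (PySem.Set.mem_ofList _ _).1 hkmem
  have hmax : ∀ y ∈ w.toList, (w.toList.count y : Int) ≤ (w.toList.count k : Int) := by
    intro y hy
    have := PySem.List.max?_isMax hk y (by
      rw [PySem.Dict.keys_counter]; exact (PySem.Set.mem_ofList _ _).2 hy)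
    simpa [PySem.Dict.getD_counter] using this
  obtain ⟨hub, d₀, hd₀, hval⟩ := pvPeak_char w (List.ne_nil_of_mem hkl)
  have h1 : (w.toList.count k : Int) ≤ pvPeak w := hub k hkl
  have h2 : pvPeak w ≤ (w.toList.count k : Int) := hval ▸ hmax d₀ hd₀
  rw [PySem.Dict.getD_counter]
  omega

lemma peak_pos (w : String) (h : w.toList ≠ []) : 1 ≤ pvPeak w := by
  obtain ⟨_, d₀, hd₀, hval⟩ := pvPeak_char w h
  have : 1 ≤ w.toList.count d₀ := List.one_le_count_iff.2 hd₀
  omega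

lemma max?_counter_some (w : String) (h : w ≠ "") :
    ∃ k, PySem.List.max? (PySem.Dict.counter w.toList).keys
          (fun x => (PySem.Dict.counter w.toList).getD x 0) = some k := by
  cases hm : PySem.List.max? (PySem.Dict.counter w.toList).keys
      (fun x => (PySem.Dict.counter w.toList).getD x 0) with
  | some k => exact ⟨k, rfl⟩
  | none =>
    exfalso
    have hk := (PySem.List.max?_eq_none_iff _ _).1 hm
    rw [PySem.Dict.keys_counter] at hk
    obtain ⟨c, hc⟩ := List.exists_mem_of_ne_nil _ (toList_ne_nil w h)
    have : c ∈ PySem.Set.ofList w.toList := (PySem.Set.mem_ofList _ _).2 hc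
    simp [hk] at this

-- one step of A's loop, on a nonempty word
lemma stepA_eq (b : String) (c : Int) (x : String) (hx : x ≠ "") :
    (fun (st : String × Int) item =>
      let dic : PySem.Dict Char Int := PySem.Dict.counter item.toList
      match PySem.List.max? dic.keys (fun y => dic.getD y 0) with
      | none => st
      | some k =>
        let max_letter := dic.getD k 0
        if st.2 < max_letter then (item, max_letter) else st) (b, c) x
    = if c < pvPeak x then (x, pvPeak x) else (b, c) := by
  obtain ⟨k, hk⟩ := max?_counter_some x hx
  simp only [hk, peakA_eq x k hk]

-- one step of B's max?: drop the loser of the first two elements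
lemma max?_cons_lt (b x : String) (t : List String) (h : pvPeak b < pvPeak x) :
    PySem.List.max? (b :: x :: t) pvPeak = PySem.List.max? (x :: t) pvPeak := by
  unfold PySem.List.max?
  rw [List.foldl_cons, List.foldl_cons, List.foldl_cons]
  congr 1
  show (if pvPeak b < pvPeak x then some x else some b) = some x
  rw [if_pos h]

lemma max?_cons_ge (b x : String) (t : List String) (h : ¬ pvPeak b < pvPeak x) :
    PySem.List.max? (b :: x :: t) pvPeak = PySem.List.max? (b :: t) pvPeak := by
  unfold PySem.List.max?
  rw [List.foldl_cons, List.foldl_cons, List.foldl_cons]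
  congr 1
  show (if pvPeak b < pvPeak x then some x else some b) = some b
  rw [if_neg h]

-- A's loop started at a seen word b agrees with max? over b :: remaining words
lemma loop_eq (ws : List String) (b : String) (h : ∀ w ∈ ws, w ≠ "") :
    ∃ r, PySem.List.max? (b :: ws) pvPeak = some r ∧
      ws.foldl (fun (st : String × Int) item =>
          let dic : PySem.Dict Char Int := PySem.Dict.counter item.toList
          match PySem.List.max? dic.keys (fun y => dic.getD y 0) with
          | none => st
          | some k =>
            let max_letter := dic.getD k 0
            if st.2 < max_letter then (item, max_letter) else st) (b, pvPeak b) = (r, pvPeak r) := by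
  induction ws generalizing b with
  | nil => exact ⟨b, rfl, rfl⟩
  | cons x t ih =>
    have hx : x ≠ "" := h x (List.mem_cons_self ..)
    have ht : ∀ w ∈ t, w ≠ "" := fun w hw => h w (List.mem_cons_of_mem _ hw)
    by_cases hlt : pvPeak b < pvPeak x
    · obtain ⟨r, h1, h2⟩ := ih x ht
      refine ⟨r, ?_, ?_⟩
      · rw [max?_cons_lt b x t hlt]; exact h1
      · simp only [List.foldl_cons, stepA_eq b (pvPeak b) x hx, if_pos hlt]; exact h2
    · obtain ⟨r, h1, h2⟩ := ih b ht
      refine ⟨r, ?_, ?_⟩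
      · rw [max?_cons_ge b x t hlt]; exact h1
      · simp only [List.foldl_cons, stepA_eq b (pvPeak b) x hx, if_neg hlt]; exact h2

-- ===== VERDICT (by name: the statement is the Claim_ definition above) =====
theorem get_counter_val_spec : Claim_equal_get_counter_val := by
  unfold Claim_equal_get_counter_val Spec_get_counter_val
  intro words _ h
  cases words with
  | nil => rfl
  | cons x t =>
    have hx : x ≠ "" := h x (List.mem_cons_self ..)
    have ht : ∀ w ∈ t, w ≠ "" := fun w hw => h w (List.mem_cons_of_mem _ hw)
    obtain ⟨r, h1, h2⟩ := loop_eq t x ht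
    have hpos : (0 : Int) < pvPeak x := lt_of_lt_of_le one_pos (peak_pos x (toList_ne_nil x hx))
    have hAfull : get_counter_val (x :: t) = r := by
      unfold get_counter_val
      simp only [List.foldl_cons, stepA_eq "" 0 x hx, if_pos hpos, h2]
    have hBfull : get_counter_val_alt (x :: t) = r := by
      unfold get_counter_val_alt PySem.List.maxD
      rw [h1]
      rfl
    rw [hAfull, hBfull]

@[simp] theorem get_counter_val_raises : Claim_raises_get_counter_val := by
  unfold Claim_raises_get_counter_val
  refine ⟨fun words _ hr hp => hp _ hr rfl, by decide⟩
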